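-- pv_equiv track=rewrite | github.com/ckoons/BubbleSpacetimeTheory | play/toy_290_noether_charge.py | compute_backbone
-- ===== SOURCE A (Python) =====
-- def compute_backbone(n, solutions):
--     """Compute backbone: variables forced to same value in ALL solutions."""
--     if not solutions:
--         return set(), {}
--     backbone = {}
--     for v in range(n):
--         vals = set(sol[v] for sol in solutions)
--         if len(vals) == 1:
--             backbone[v] = list(vals)[0]
--     return set(backbone.keys()), backbone
-- ===== SOURCE B (Python) =====
-- def compute_backbone(n, solutions):
--     """Compute backbone: variables forced to same value in ALL solutions."""
--     if not solutions:
--         return set(), {}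
--     backbone = {v: solutions[0][v] for v in range(n)}
--     for sol in solutions[1:]:
--         for v in list(backbone):
--             if sol[v] != backbone[v]:
--                 del backbone[v]
--     return set(backbone.keys()), backbone
-- ===== Notes on version B (the rewrite author's own statement) =====
-- stated objective: alternative
-- what changed: Replaces per-variable column scans that build a value set for every v with row-wise narrowing: seed candidates from the first solution and delete mismatching keys while scanning each remaining solution once.
import Mathlib
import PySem

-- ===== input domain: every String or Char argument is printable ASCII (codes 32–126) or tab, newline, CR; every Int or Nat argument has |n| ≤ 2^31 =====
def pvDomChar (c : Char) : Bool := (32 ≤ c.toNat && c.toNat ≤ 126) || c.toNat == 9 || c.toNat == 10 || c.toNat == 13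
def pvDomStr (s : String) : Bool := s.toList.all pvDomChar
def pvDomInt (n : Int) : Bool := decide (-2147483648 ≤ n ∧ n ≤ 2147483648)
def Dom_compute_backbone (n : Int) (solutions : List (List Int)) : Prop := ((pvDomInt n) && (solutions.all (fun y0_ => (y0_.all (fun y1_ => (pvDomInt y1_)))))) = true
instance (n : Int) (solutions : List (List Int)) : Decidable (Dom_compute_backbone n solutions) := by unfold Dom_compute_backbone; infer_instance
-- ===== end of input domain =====

-- B replaces A's per-variable column scans (a value set per v) by row-wise narrowing of a
-- candidate dict seeded from the first solution; same results wherever A returns.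


-- ===== PORT A =====
-- sol[v] is ported as pyGetD sol v 0: Pre_ guarantees v is in range, where pyGetD = sol[v] exactly.
def compute_backbone (n : Int) (solutions : List (List Int)) : List Int × (List (Int × Int)) :=
  if solutions = [] then ([], [])
  else
    let backbone : PySem.Dict Int Int :=
      (PySem.List.pyRange 0 n 1).foldl (fun d v =>
        let vals : PySem.Set Int :=
          PySem.Set.ofList (solutions.map (fun sol => PySem.List.pyGetD sol v 0))
        if PySem.Set.len vals = 1 then d.insert v (PySem.List.pyGetD vals 0 0) else d)
        PySem.Dict.empty
    (PySem.Set.ofList backbone.keys, backbone.items)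

-- ===== PORT B =====
-- the candidate dict of B, kept as its (key, value) pair list; 'del' on a scanned snapshot = filter.
def compute_backbone_alt (n : Int) (solutions : List (List Int)) : List Int × (List (Int × Int)) :=
  match solutions with
  | [] => ([], [])
  | hd :: tl =>
    let backbone :=
      tl.foldl (fun b sol => b.filter (fun p => PySem.List.pyGetD sol p.1 0 == p.2))
        ((PySem.List.pyRange 0 n 1).map (fun v => (v, PySem.List.pyGetD hd v 0)))
    (backbone.map (·.1), backbone)

-- ===== PRECONDITION & SPEC =====
-- Pre_ excludes exactly the inputs where Python A raises IndexError: a nonempty solution list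
-- containing a solution shorter than n.
def Pre_compute_backbone (n : Int) (solutions : List (List Int)) : Prop :=
  solutions = [] ∨ ∀ sol ∈ solutions, n ≤ (sol.length : Int)
instance (n : Int) (solutions : List (List Int)) : Decidable (Pre_compute_backbone n solutions) := by unfold Pre_compute_backbone; infer_instance
def pvWitness_compute_backbone : Int × List (List Int) := (2, [[1, 2], [1, 3]])
def Spec_compute_backbone (n : Int) (solutions : List (List Int)) (out : List Int × (List (Int × Int))) : Prop := out = compute_backbone_alt n solutions
instance (n : Int) (solutions : List (List Int)) (out : List Int × (List (Int × Int))) : Decidable (Spec_compute_backbone n solutions out) := by unfold Spec_compute_backbone; infer_instance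

-- ===== CLAIM (what is proved, stated in full; the proofs are below) =====
def Claim_equal_compute_backbone : Prop := ∀ (n : Int) (solutions : List (List Int)), Dom_compute_backbone n solutions → Pre_compute_backbone n solutions → Spec_compute_backbone n solutions (compute_backbone n solutions)

-- ===== LEMMAS AND PROOFS =====

-- adding elements already in the set changes nothing
lemma foldl_add_all_mem (rest s : List Int) (h : ∀ x ∈ rest, x ∈ s) :
    rest.foldl PySem.Set.add s = s := by
  induction rest with
  | nil => rfl
  | cons x xs ih =>
    have hx : PySem.Set.add s x = s := by
      simp [PySem.Set.add]
      exact h x (by simp)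
    simp only [List.foldl_cons, hx]
    exact ih (fun y hy => h y (by simp [hy]))

lemma ofList_cons_eq_singleton (a : Int) (rest : List Int) (h : ∀ x ∈ rest, x = a) :
    PySem.Set.ofList (a :: rest) = [a] := by
  have : PySem.Set.ofList (a :: rest) = rest.foldl PySem.Set.add (PySem.Set.add [] a) := by
    simp [PySem.Set.ofList_eq_foldl]
  rw [this]
  have ha : PySem.Set.add ([] : List Int) a = [a] := by simp [PySem.Set.add, PySem.Set.contains]
  rw [ha, foldl_add_all_mem]
  intro x hx; simp [h x hx]

lemma len_one_iff (a : Int) (rest : List Int) :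
    PySem.Set.len (PySem.Set.ofList (a :: rest)) = 1 ↔ ∀ x ∈ rest, x = a := by
  constructor
  · intro h1
    have ha : a ∈ PySem.Set.ofList (a :: rest) := by
      rw [PySem.Set.mem_ofList]; simp
    intro x hx
    have hxm : x ∈ PySem.Set.ofList (a :: rest) := by
      rw [PySem.Set.mem_ofList]; simp [hx]
    match hs : PySem.Set.ofList (a :: rest) with
    | [] => rw [hs] at ha; simp at ha
    | [b] =>
      rw [hs] at ha hxm; simp at ha hxm; omega
    | b :: c :: t =>
      rw [hs] at h1; simp [PySem.Set.len] at h1; omega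
  · intro h
    rw [ofList_cons_eq_singleton a rest h]
    rfl

-- B's fold of filters is one filter by the conjunction over all rows
lemma foldl_filter_eq_filter_all {α β : Type} (l : List β) (xs : List α) (p : β → α → Bool) :
    l.foldl (fun b sol => b.filter (p sol)) xs
      = xs.filter (fun x => l.all (fun sol => p sol x)) := by
  induction l generalizing xs with
  | nil => simp
  | cons sol rest ih =>
    simp only [List.foldl_cons, ih, List.filter_filter, List.all_cons]
    congr 1
    funext x
    rw [Bool.and_comm]

-- ===== VERDICT (by name: the statement is the Claim_ definition above) =====
theorem compute_backbone_spec : Claim_equal_compute_backbone := by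
  intro n solutions _ _
  unfold Spec_compute_backbone compute_backbone compute_backbone_alt
  match solutions with
  | [] => simp
  | hd :: tl =>
    simp only [if_neg (by simp : ¬(hd :: tl = []))]
    set g : Int → Int := fun v =>
      PySem.List.pyGetD
        (PySem.Set.ofList ((hd :: tl).map (fun sol => PySem.List.pyGetD sol v 0))) 0 0 with hg
    set c : Int → Prop := fun v =>
      PySem.Set.len (PySem.Set.ofList ((hd :: tl).map (fun sol => PySem.List.pyGetD sol v 0))) = 1 with hc
    set allp : Int → Bool := fun v =>
      tl.all (fun sol => PySem.List.pyGetD sol v 0 == PySem.List.pyGetD hd v 0) with hallp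
    -- A's dict as a filtered, mapped range
    have hA : ((PySem.List.pyRange 0 n 1).foldl (fun d v =>
        if PySem.Set.len (PySem.Set.ofList ((hd :: tl).map (fun sol => PySem.List.pyGetD sol v 0))) = 1
        then d.insert v (g v) else d) PySem.Dict.empty).items
        = ((PySem.List.pyRange 0 n 1).filter (fun v => decide (c v))).map (fun v => (v, g v)) := by
      rw [PySem.List.foldl_ite_eq_foldl_filter]
      rw [PySem.Dict.items_foldl_insert_fresh (k := fun v => v) (v := g)]
      · rfl
      · intro a _; simp [PySem.Dict.contains_empty]
      · simp only [List.map_id']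
        exact (PySem.List.nodup_pyRange_one 0 n).filter _
    -- the two acceptance conditions agree …
    have key : ∀ v : Int, c v ↔ ∀ sol ∈ tl, PySem.List.pyGetD sol v 0 = PySem.List.pyGetD hd v 0 := by
      intro v
      simp only [hc, List.map_cons, len_one_iff, List.mem_map]
      constructor
      · intro h sol hs; exact h _ ⟨sol, hs, rfl⟩
      · rintro h x ⟨sol, hs, rfl⟩; exact h sol hs
    have hfilter : (PySem.List.pyRange 0 n 1).filter (fun v => decide (c v))
        = (PySem.List.pyRange 0 n 1).filter allp := by
      apply List.filter_congr
      intro v _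
      rw [Bool.eq_iff_iff, decide_eq_true_iff, key, hallp, List.all_eq_true]
      simp
    -- … and on accepted v the recorded values agree
    have hval : ∀ v : Int, c v → g v = PySem.List.pyGetD hd v 0 := by
      intro v hv
      simp only [hc, List.map_cons] at hv
      have hall := (len_one_iff _ _).mp hv
      simp only [hg, List.map_cons,
        ofList_cons_eq_singleton (PySem.List.pyGetD hd v 0) _ hall]
      rfl
    have hmap : ((PySem.List.pyRange 0 n 1).filter (fun v => decide (c v))).map (fun v => (v, g v))
        = ((PySem.List.pyRange 0 n 1).filter (fun v => decide (c v))).map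
            (fun v => (v, PySem.List.pyGetD hd v 0)) := by
      apply List.map_congr_left
      intro v hv
      have : c v := by simpa using (List.mem_filter.mp hv).2
      rw [hval v this]
    -- B's list as the same filtered, mapped range
    have hB : tl.foldl (fun b sol => b.filter (fun p => PySem.List.pyGetD sol p.1 0 == p.2))
        ((PySem.List.pyRange 0 n 1).map (fun v => (v, PySem.List.pyGetD hd v 0)))
        = ((PySem.List.pyRange 0 n 1).filter allp).map
            (fun v => (v, PySem.List.pyGetD hd v 0)) := by
      rw [foldl_filter_eq_filter_all, List.filter_map]
      rfl
    have h2 : ((PySem.List.pyRange 0 n 1).foldl (fun d v =>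
        if PySem.Set.len (PySem.Set.ofList ((hd :: tl).map (fun sol => PySem.List.pyGetD sol v 0))) = 1
        then d.insert v (g v) else d) PySem.Dict.empty).items
        = ((PySem.List.pyRange 0 n 1).filter allp).map (fun v => (v, PySem.List.pyGetD hd v 0)) := by
      rw [hA, hmap, hfilter]
    have h1 : PySem.Set.ofList ((PySem.List.pyRange 0 n 1).foldl (fun d v =>
        if PySem.Set.len (PySem.Set.ofList ((hd :: tl).map (fun sol => PySem.List.pyGetD sol v 0))) = 1
        then d.insert v (g v) else d) PySem.Dict.empty).keys
        = (((PySem.List.pyRange 0 n 1).filter allp).map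
            (fun v => (v, PySem.List.pyGetD hd v 0))).map (fun x => x.1) := by
      simp only [PySem.Dict.keys, h2, List.map_map]
      rw [PySem.Set.ofList_eq_self_of_nodup]
      rw [show ((fun x : Int × Int => x.1) ∘ fun v => (v, PySem.List.pyGetD hd v 0)) = id from rfl,
        List.map_id]
      exact (PySem.List.nodup_pyRange_one 0 n).filter allp
    rw [hB]
    exact Prod.ext h1 h2
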